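-- pv_equiv track=rewrite | github.com/GoBeromsu/Wiggle-TIL | BaekJoon/1622.py | check
-- ===== SOURCE A (Python) =====
-- def check(A,B):
--     arr=[]
--     result=[]
--     temp=''
--     for a in A:
--         if a in B:
--             temp+=a
--         else:
--             arr.append(temp)
--             temp=''
--     if temp:
--         arr.append(temp)
--     temp=''
--     maxLen=0
--     for a in arr:
--         if len(a)>maxLen:
--             maxLen=len(a)
--     for a in arr:
--         if len(a)==maxLen:
--             result.append(a)
--     result.sort()
--     for r in result:
--         temp+=r
--     return temp
-- ===== SOURCE B (Python) =====
-- def check(A, B):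
--     best = []
--     maxLen = 0
--     cur = ''
--     for a in A:
--         if a in B:
--             cur += a
--         else:
--             if len(cur) > maxLen:
--                 maxLen = len(cur)
--                 best = [cur]
--             elif len(cur) == maxLen and maxLen > 0:
--                 best.append(cur)
--             cur = ''
--     if len(cur) > maxLen:
--         maxLen = len(cur)
--         best = [cur]
--     elif len(cur) == maxLen and maxLen > 0:
--         best.append(cur)
--     best.sort()
--     return ''.join(best)
-- ===== Notes on version B (the rewrite author's own statement) =====
-- stated objective: simpler
-- what changed: A builds the full list of runs (including an empty string per non-B character) and then makes two more passes to find the max length and collect the winners; B keeps only the running best list and current run in a single pass, finalizing each run at its boundary, then sorts and joins once.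
import Mathlib
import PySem

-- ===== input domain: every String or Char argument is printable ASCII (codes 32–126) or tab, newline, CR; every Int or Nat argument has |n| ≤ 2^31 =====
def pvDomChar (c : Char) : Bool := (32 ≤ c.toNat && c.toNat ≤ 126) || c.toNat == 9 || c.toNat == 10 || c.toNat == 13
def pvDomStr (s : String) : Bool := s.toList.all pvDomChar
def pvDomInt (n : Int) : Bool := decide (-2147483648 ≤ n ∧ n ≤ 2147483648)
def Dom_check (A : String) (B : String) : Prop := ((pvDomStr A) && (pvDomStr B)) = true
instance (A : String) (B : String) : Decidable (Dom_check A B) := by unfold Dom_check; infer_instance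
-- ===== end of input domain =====

-- B replaces A's three passes (collect every run, find the max length, collect the winners)
-- by a single pass that keeps only the running best list; objective: simpler.

-- ===== PORT A =====
-- first loop of A: split into runs of chars contained in B (an empty run per non-B char)
def checkStep (B : List Char) (s : List (List Char) × List Char) (a : Char) :
    List (List Char) × List Char :=
  if PySem.Chars.isIn [a] B then (s.1, s.2 ++ [a]) else (s.1 ++ [s.2], ([] : List Char))

-- second loop of A: maxLen
def checkMax (arr : List (List Char)) : Nat :=
  arr.foldl (fun m a => if a.length > m then a.length else m) 0

-- third loop of A: collect the runs of maximal length
def checkCollect (arr : List (List Char)) (maxLen : Nat) : List (List Char) :=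
  arr.foldl (fun r a => if a.length = maxLen then r ++ [a] else r) []

-- last loop of A: temp += r
def checkJoin (result : List (List Char)) : List Char :=
  result.foldl (fun t r => t ++ r) []

def check (A : String) (B : String) : String :=
  let s := A.toList.foldl (checkStep B.toList) (([] : List (List Char)), ([] : List Char))
  let arr := if s.2 ≠ [] then s.1 ++ [s.2] else s.1
  let maxLen := checkMax arr
  let result := PySem.List.sorted (checkCollect arr maxLen) (fun x => x) false
  String.ofList (checkJoin result)

-- ===== PORT B =====
-- finalize the current run against the running best
def checkFin (best : List (List Char)) (maxLen : Nat) (cur : List Char) :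
    List (List Char) × Nat :=
  if cur.length > maxLen then ([cur], cur.length)
  else if cur.length = maxLen ∧ maxLen > 0 then (best ++ [cur], maxLen)
  else (best, maxLen)

def checkAltStep (B : List Char) (s : List (List Char) × Nat × List Char) (a : Char) :
    List (List Char) × Nat × List Char :=
  if PySem.Chars.isIn [a] B then (s.1, s.2.1, s.2.2 ++ [a])
  else
    let f := checkFin s.1 s.2.1 s.2.2
    (f.1, f.2, ([] : List Char))

def check_alt (A : String) (B : String) : String :=
  let s := A.toList.foldl (checkAltStep B.toList)
      (([] : List (List Char)), 0, ([] : List Char))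
  let f := checkFin s.1 s.2.1 s.2.2
  String.ofList (PySem.List.sorted f.1 (fun x => x) false).flatten

-- ===== PRECONDITION & SPEC =====
def Spec_check (A : String) (B : String) (out : String) : Prop := out = check_alt A B
instance (A : String) (B : String) (out : String) : Decidable (Spec_check A B out) := by unfold Spec_check; infer_instance

-- ===== CLAIM (what is proved, stated in full; the proofs are below) =====
def Claim_equal_check : Prop := ∀ (A : String) (B : String), Dom_check A B → Spec_check A B (check A B)

-- ===== LEMMAS AND PROOFS =====

-- the winners as A computes them at the end, as a function of the run list
def bestOf (arr : List (List Char)) : List (List Char) :=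
  if checkMax arr = 0 then [] else arr.filter (fun a => decide (a.length = checkMax arr))

-- abstraction of B's state from A's state
def absState (s : List (List Char) × List Char) : List (List Char) × Nat × List Char :=
  (bestOf s.1, checkMax s.1, s.2)

lemma checkMax_cons (a : List Char) (l : List (List Char)) :
    checkMax (a :: l) = max a.length (checkMax l) := by
  have go : ∀ (l : List (List Char)) (i j : Nat),
      l.foldl (fun m a => if a.length > m then a.length else m) (max i j)
        = max i (l.foldl (fun m a => if a.length > m then a.length else m) j) := by
    intro l
    induction l with
    | nil => intro i j; simp
    | cons x xs ih =>
      intro i j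
      simp only [List.foldl_cons]
      have h : (if x.length > max i j then x.length else max i j)
          = max i (if x.length > j then x.length else j) := by
        split_ifs <;> omega
      rw [h, ih]
  have h0 : (if a.length > 0 then a.length else 0) = max a.length 0 := by
    split_ifs <;> omega
  show List.foldl _ (if a.length > 0 then a.length else 0) l = _
  rw [h0, go l a.length 0]
  rfl

lemma checkMax_append (arr : List (List Char)) (t : List Char) :
    checkMax (arr ++ [t]) = max (checkMax arr) t.length := by
  induction arr with
  | nil =>
    simp only [List.nil_append, checkMax, List.foldl_cons, List.foldl_nil]
    split_ifs <;> omega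
  | cons a l ih => rw [List.cons_append, checkMax_cons, checkMax_cons, ih]; omega

lemma length_le_checkMax {x : List Char} {arr : List (List Char)} (h : x ∈ arr) :
    x.length ≤ checkMax arr := by
  induction arr with
  | nil => cases h
  | cons a l ih =>
    rw [checkMax_cons]
    rcases List.mem_cons.1 h with h | h
    · subst h; omega
    · exact le_trans (ih h) (le_max_right _ _)

lemma checkCollect_eq_filter (arr : List (List Char)) (m : Nat) :
    checkCollect arr m = arr.filter (fun a => decide (a.length = m)) := by
  simpa [checkCollect] using
    PySem.List.foldl_append_if (fun a : List Char => decide (a.length = m)) id arr []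

-- the heart: B's finalize advances the abstraction by one run
lemma checkFin_spec (arr : List (List Char)) (t : List Char) :
    checkFin (bestOf arr) (checkMax arr) t
      = (bestOf (arr ++ [t]), checkMax (arr ++ [t])) := by
  have hmax := checkMax_append arr t
  unfold checkFin
  split_ifs with h1 h2
  · -- t longer than everything so far
    have hm : checkMax (arr ++ [t]) = t.length := by omega
    have hfil : arr.filter (fun a => decide (a.length = t.length)) = [] := by
      rw [List.filter_eq_nil_iff]
      intro x hx
      have := length_le_checkMax hx
      simp; omega
    have ht0 : t.length ≠ 0 := by omega
    simp [bestOf, hm, ht0, List.filter_append, hfil]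
  · -- tie with a positive max
    obtain ⟨he, hpos⟩ := h2
    have hm : checkMax (arr ++ [t]) = checkMax arr := by omega
    have hne : checkMax arr ≠ 0 := by omega
    simp [bestOf, hm, hne, List.filter_append, he]
  · -- shorter run (or max still 0): state unchanged
    have hle : t.length ≤ checkMax arr := by omega
    have hm : checkMax (arr ++ [t]) = checkMax arr := by omega
    by_cases h0 : checkMax arr = 0
    · have ht : t.length = 0 := by omega
      simp [bestOf, hm, h0]
    · have hne : t.length ≠ checkMax arr := fun he => h2 ⟨he, Nat.pos_of_ne_zero h0⟩
      simp [bestOf, hm, h0, List.filter_append, hne]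

lemma step_comm (B : List Char) (s : List (List Char) × List Char) (a : Char) :
    checkAltStep B (absState s) a = absState (checkStep B s a) := by
  unfold checkAltStep checkStep absState
  by_cases h : PySem.Chars.isIn [a] B = true
  · simp [h]
  · simp only [h, if_neg, Bool.not_eq_true]
    simp [checkFin_spec s.1 s.2]

lemma foldl_comm (B : List Char) (l : List Char) (s : List (List Char) × List Char) :
    l.foldl (checkAltStep B) (absState s) = absState (l.foldl (checkStep B) s) := by
  induction l generalizing s with
  | nil => rfl
  | cons a l ih => simp only [List.foldl_cons, step_comm, ih]

lemma flatten_sorted_zero (l : List (List Char)) (h : ∀ x ∈ l, x = ([] : List Char)) :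
    (PySem.List.sorted l (fun x => x) false).flatten = [] := by
  rw [List.flatten_eq_nil_iff]
  intro x hx
  exact h x ((PySem.List.mem_sorted _ _ _ _).1 hx)

-- ===== VERDICT (by name: the statement is the Claim_ definition above) =====
theorem check_spec : Claim_equal_check := by
  intro A B _
  unfold Spec_check check check_alt
  have hfold := foldl_comm B.toList A.toList (([] : List (List Char)), ([] : List Char))
  have habs0 : absState (([] : List (List Char)), ([] : List Char))
      = (([] : List (List Char)), 0, ([] : List Char)) := by
    simp [absState, bestOf, checkMax]
  rw [← habs0, hfold]
  set s := A.toList.foldl (checkStep B.toList) (([] : List (List Char)), ([] : List Char)) with hs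
  -- B's final finalize equals the abstraction of A's final run list
  have hfin : checkFin (absState s).1 (absState s).2.1 (absState s).2.2
      = (bestOf (if s.2 ≠ [] then s.1 ++ [s.2] else s.1),
         checkMax (if s.2 ≠ [] then s.1 ++ [s.2] else s.1)) := by
    by_cases h2 : s.2 = []
    · have hl : s.2.length = 0 := by rw [h2]; rfl
      simp only [h2, ne_eq, not_true_eq_false, if_false]
      unfold absState checkFin
      rw [hl]
      split_ifs with ha hb
      · exact absurd ha (by omega)
      · exact absurd hb (by omega)
      · rfl
    · simp only [ne_eq, h2, not_false_iff, if_true]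
      exact checkFin_spec s.1 s.2
  simp only [absState] at hfin ⊢
  rw [hfin]
  set arr := if s.2 ≠ [] then s.1 ++ [s.2] else s.1 with harr
  rw [checkCollect_eq_filter]
  by_cases h0 : checkMax arr = 0
  · -- max length 0: A joins a (possibly empty) list of empty runs, B joins []
    have hA : (PySem.List.sorted (arr.filter (fun a => decide (a = ([] : List Char))))
        (fun x => x) false).flatten = [] := by
      apply flatten_sorted_zero
      intro x hx
      rcases List.mem_filter.1 hx with ⟨_, hlen⟩
      simpa using hlen
    have hnil : PySem.List.sorted ([] : List (List Char)) (fun x => x) false = [] := rfl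
    simp [bestOf, h0, checkJoin, PySem.List.foldl_append_eq_flatten, hnil, hA]
  · -- positive max length: the two lists are identical
    simp [bestOf, h0, checkJoin, PySem.List.foldl_append_eq_flatten]
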